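-- pv_equiv track=rewrite | github.com/joshlaplante/project-euler-problems | 5 smallest multiple.py | LCMprimeList
-- ===== SOURCE A (Python) =====
-- def primeFactorize(N):
--     primeFactorList = []
--     divisor = 2
--     while divisor**2 <= N:
--         while N%divisor == 0:
--             primeFactorList.append(divisor)
--             N//=divisor
--         divisor+=1
--     if N >1:
--         primeFactorList.append(N)
--     return primeFactorList
--
-- def LCMprimeList(num):
--     primeFactorSet = []
--     for i in range(2,num+1):
--         currentPrimeList = primeFactorize(i)
--         for j in currentPrimeList:
--             if j not in primeFactorSet:
--                 primeFactorSet.append(j)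
--             if j in primeFactorSet:
--                 currentCount = currentPrimeList.count(j)
--                 setCount = primeFactorSet.count(j)
--                 if currentCount > setCount:
--                     difference = currentCount - setCount
--                     for i in range(difference):
--                         primeFactorSet.append(j)
--     primeFactorSet.sort()
--     return primeFactorSet
-- ===== SOURCE B (Python) =====
-- def LCMprimeList(num):
--     # One pass with a dict of maximal prime exponents; output built from sorted keys
--     # (no per-factor membership/count scans over a growing list, no final multiset sort).
--     best = {}
--     for i in range(2, num + 1):
--         n, d = i, 2
--         while d * d <= n:
--             if n % d == 0:
--                 e = 0
--                 while n % d == 0: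
--                     n //= d
--                     e += 1
--                 if best.get(d, 0) < e:
--                     best[d] = e
--             d += 1
--         if n > 1:
--             if best.get(n, 0) < 1:
--                 best[n] = 1
--     out = []
--     for p in sorted(best):
--         out.extend([p] * best[p])
--     return out
-- ===== Notes on version B (the rewrite author's own statement) =====
-- stated objective: faster
-- what changed: A keeps a growing flat list of factors and, for every factor of every i, rescans it with membership tests and .count() before appending and finally sorts the whole multiset; B makes one pass keeping a dict of maximal prime exponents (factorizing each i by exponent counting, no intermediate factor list) and emits the answer directly from the sorted dict keys with replication.
import Mathlib
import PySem

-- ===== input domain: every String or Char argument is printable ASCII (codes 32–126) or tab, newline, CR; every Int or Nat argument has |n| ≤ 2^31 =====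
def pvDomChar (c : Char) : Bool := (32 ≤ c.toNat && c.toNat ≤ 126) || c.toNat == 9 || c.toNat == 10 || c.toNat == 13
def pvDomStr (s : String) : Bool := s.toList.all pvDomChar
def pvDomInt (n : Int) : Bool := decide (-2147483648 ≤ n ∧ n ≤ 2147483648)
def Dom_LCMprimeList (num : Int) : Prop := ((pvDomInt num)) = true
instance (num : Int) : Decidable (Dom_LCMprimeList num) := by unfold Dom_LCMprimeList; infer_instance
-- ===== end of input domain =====

-- B replaces A's list-of-factors with per-factor membership/count scans and a final sort
-- by a single pass keeping a dict of maximal prime exponents, emitting sorted keys (faster).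


-- ===== PORT A =====
-- inner 'while N % divisor == 0: primeFactorList.append(divisor); N //= divisor'
-- (the Nat fuel only makes the loop total; N.natAbs steps always suffice, see pfStrip_eq)
def pfStripF : Nat → Int → Int → List Int × Int
  | 0, N, _ => ([], N)
  | f + 1, N, d =>
    if 0 < N ∧ 2 ≤ d ∧ PySem.Int.mod N d = 0 then
      let r := pfStripF f (PySem.Int.floordiv N d) d
      (d :: r.1, r.2)
    else ([], N)

def pfStrip (N d : Int) : List Int × Int := pfStripF N.natAbs N d

-- outer 'while divisor**2 <= N: … divisor += 1' of primeFactorize, then the trailing 'if N > 1'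
def pfOuterF : Nat → Int → Int → List Int
  | 0, N, _ => if 1 < N then [N] else []
  | f + 1, N, d =>
    if 2 ≤ d ∧ d * d ≤ N then
      let r := pfStrip N d
      r.1 ++ pfOuterF f r.2 (d + 1)
    else if 1 < N then [N] else []

def pfOuter (N d : Int) : List Int := pfOuterF (N + 1 - d).toNat N d

def primeFactorize (N : Int) : List Int := pfOuter N 2

-- body of 'for j in currentPrimeList: …' (membership test, append, count comparison, append loop)
def mergeOne (cpl : List Int) (S : List Int) (j : Int) : List Int :=
  let S1 := if j ∈ S then S else S ++ [j]
  if j ∈ S1 then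
    let c : Int := (PySem.List.count cpl j : Int)
    let s : Int := (PySem.List.count S1 j : Int)
    if s < c then
      (PySem.List.pyRange 0 (c - s) 1).foldl (fun acc _ => acc ++ [j]) S1
    else S1
  else S1

def LCMprimeList (num : Int) : List Int :=
  let S := (PySem.List.pyRange 2 (num + 1) 1).foldl
    (fun S i => (primeFactorize i).foldl (mergeOne (primeFactorize i)) S) []
  PySem.List.sorted S (fun x => x) false

-- ===== PORT B =====
-- 'e = 0; while n % d == 0: n //= d; e += 1'  (same Nat-fuel totality device as pfStripF)
def bStripF : Nat → Int → Int → Int → Int × Int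
  | 0, n, _, e => (n, e)
  | f + 1, n, d, e =>
    if 0 < n ∧ 2 ≤ d ∧ PySem.Int.mod n d = 0 then
      bStripF f (PySem.Int.floordiv n d) d (e + 1)
    else (n, e)

def bStrip (n d e : Int) : Int × Int := bStripF n.natAbs n d e

-- B's 'while d * d <= n:' loop plus the trailing 'if n > 1:' dict update
def bLoopF : Nat → Int → Int → PySem.Dict Int Int → PySem.Dict Int Int
  | 0, n, _, best => if 1 < n then (if best.getD n 0 < 1 then best.insert n 1 else best) else best
  | f + 1, n, d, best =>
    if 2 ≤ d ∧ d * d ≤ n then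
      if PySem.Int.mod n d = 0 then
        let r := bStrip n d 0
        let best' := if best.getD d 0 < r.2 then best.insert d r.2 else best
        bLoopF f r.1 (d + 1) best'
      else bLoopF f n (d + 1) best
    else if 1 < n then (if best.getD n 0 < 1 then best.insert n 1 else best) else best

def bLoop (n d : Int) (best : PySem.Dict Int Int) : PySem.Dict Int Int :=
  bLoopF (n + 1 - d).toNat n d best

def LCMprimeList_alt (num : Int) : List Int :=
  let best := (PySem.List.pyRange 2 (num + 1) 1).foldl (fun D i => bLoop i 2 D) PySem.Dict.empty
  (PySem.List.sorted (PySem.Dict.keys best) (fun x => x) false).foldl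
    -- p comes from best's keys, so Python's best[p] cannot raise; getD is exact here
    (fun out p => out ++ PySem.List.pyRepeat [p] (best.getD p 0)) []

-- ===== PRECONDITION & SPEC =====
def Spec_LCMprimeList (num : Int) (out : List Int) : Prop := out = LCMprimeList_alt num
instance (num : Int) (out : List Int) : Decidable (Spec_LCMprimeList num out) := by unfold Spec_LCMprimeList; infer_instance

-- ===== CLAIM (what is proved, stated in full; the proofs are below) =====
def Claim_equal_LCMprimeList : Prop := ∀ (num : Int), Dom_LCMprimeList num → Spec_LCMprimeList num (LCMprimeList num)

-- ===== LEMMAS AND PROOFS =====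

-- dividing a positive N by d ≥ 2 shrinks |N| (the loops' variant)
theorem fd_natAbs_lt (N d : Int) (h1 : 0 < N) (h2 : 2 ≤ d) :
    (PySem.Int.floordiv N d).natAbs < N.natAbs := by
  rw [PySem.Int.floordiv_eq_ediv_of_pos (by omega)]
  have hlt : N / d < 1 * N := by
    rw [Int.ediv_lt_iff_lt_mul (by omega)]
    nlinarith
  have h0 : 0 ≤ N / d := Int.ediv_nonneg (by omega) (by omega)
  exact Int.natAbs_lt_natAbs_of_nonneg_of_lt h0 (by omega)

-- any fuel ≥ |N| gives pfStripF the same value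
theorem pfStripF_congr : ∀ (f g : Nat) (N d : Int), N.natAbs ≤ f → N.natAbs ≤ g →
    pfStripF f N d = pfStripF g N d := by
  intro f
  induction f with
  | zero =>
    intro g N d hf _
    have hN : N = 0 := by omega
    cases g with
    | zero => rfl
    | succ g => simp only [pfStripF]; rw [if_neg (by omega)]
  | succ f ih =>
    intro g N d hf hg
    cases g with
    | zero =>
      have hN : N = 0 := by omega
      simp only [pfStripF]; rw [if_neg (by omega)]
    | succ g =>
      simp only [pfStripF]
      by_cases hguard : 0 < N ∧ 2 ≤ d ∧ PySem.Int.mod N d = 0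
      · rw [if_pos hguard, if_pos hguard]
        have hlt := fd_natAbs_lt N d hguard.1 hguard.2.1
        rw [ih g (PySem.Int.floordiv N d) d (by omega) (by omega)]
      · rw [if_neg hguard, if_neg hguard]

-- the wrapper really is the while loop: one unguarded unfolding step
theorem pfStrip_eq (N d : Int) : pfStrip N d =
    if 0 < N ∧ 2 ≤ d ∧ PySem.Int.mod N d = 0 then
      (d :: (pfStrip (PySem.Int.floordiv N d) d).1, (pfStrip (PySem.Int.floordiv N d) d).2)
    else ([], N) := by
  show pfStripF N.natAbs N d = _
  by_cases hguard : 0 < N ∧ 2 ≤ d ∧ PySem.Int.mod N d = 0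
  · have hlt := fd_natAbs_lt N d hguard.1 hguard.2.1
    rcases hN : N.natAbs with _ | m
    · omega
    · simp only [pfStripF]
      rw [if_pos hguard, if_pos hguard,
        pfStripF_congr m (PySem.Int.floordiv N d).natAbs (PySem.Int.floordiv N d) d
          (by omega) (le_refl _)]
      rfl
  · rcases hN : N.natAbs with _ | m
    · simp only [pfStripF]
      rw [if_neg hguard]
    · simp only [pfStripF]
      rw [if_neg hguard, if_neg hguard]

theorem bStripF_congr : ∀ (f g : Nat) (n d e : Int), n.natAbs ≤ f → n.natAbs ≤ g →
    bStripF f n d e = bStripF g n d e := by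
  intro f
  induction f with
  | zero =>
    intro g n d e hf _
    cases g with
    | zero => rfl
    | succ g => simp only [bStripF]; rw [if_neg (by omega)]
  | succ f ih =>
    intro g n d e hf hg
    cases g with
    | zero => simp only [bStripF]; rw [if_neg (by omega)]
    | succ g =>
      simp only [bStripF]
      by_cases hguard : 0 < n ∧ 2 ≤ d ∧ PySem.Int.mod n d = 0
      · rw [if_pos hguard, if_pos hguard]
        have hlt := fd_natAbs_lt n d hguard.1 hguard.2.1
        exact ih g (PySem.Int.floordiv n d) d (e + 1) (by omega) (by omega)
      · rw [if_neg hguard, if_neg hguard]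

theorem bStrip_eq (n d e : Int) : bStrip n d e =
    if 0 < n ∧ 2 ≤ d ∧ PySem.Int.mod n d = 0 then
      bStrip (PySem.Int.floordiv n d) d (e + 1)
    else (n, e) := by
  show bStripF n.natAbs n d e = _
  by_cases hguard : 0 < n ∧ 2 ≤ d ∧ PySem.Int.mod n d = 0
  · have hlt := fd_natAbs_lt n d hguard.1 hguard.2.1
    rcases hN : n.natAbs with _ | m
    · omega
    · simp only [bStripF]
      rw [if_pos hguard, if_pos hguard]
      exact bStripF_congr m (PySem.Int.floordiv n d).natAbs (PySem.Int.floordiv n d) d (e + 1)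
        (by omega) (le_refl _)
  · rcases hN : n.natAbs with _ | m
    · simp only [bStripF]
      rw [if_neg hguard]
    · simp only [bStripF]
      rw [if_neg hguard, if_neg hguard]

-- properties of A's inner loop
theorem pfStrip_spec_aux : ∀ (f : Nat) (N d : Int), N.natAbs ≤ f → 0 < N → 2 ≤ d →
    0 < (pfStrip N d).2 ∧ (pfStrip N d).2 ≤ N ∧ (pfStrip N d).2 ∣ N ∧
      ¬ d ∣ (pfStrip N d).2 := by
  intro f
  induction f with
  | zero => intro N d hf h1 h2; omega
  | succ f ih =>
    intro N d hf h1 h2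
    rw [pfStrip_eq]
    by_cases hguard : 0 < N ∧ 2 ≤ d ∧ PySem.Int.mod N d = 0
    · have hm := hguard.2.2
      have hdvd : d ∣ N := (PySem.Int.mod_eq_zero_iff_dvd N d).mp hm
      have hfd : PySem.Int.floordiv N d = N / d := PySem.Int.floordiv_eq_ediv_of_pos (by omega)
      have hq0 : 0 < N / d := by
        rcases hdvd with ⟨c, rfl⟩
        rw [Int.mul_ediv_cancel_left _ (by omega)]
        nlinarith
      have hqle : PySem.Int.floordiv N d ≤ N := by
        rw [hfd]; exact Int.ediv_le_self d (by omega)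
      have hqdvd : PySem.Int.floordiv N d ∣ N := by
        rw [hfd]; exact ⟨d, (Int.ediv_mul_cancel hdvd).symm⟩
      have hlt := fd_natAbs_lt N d h1 h2
      obtain ⟨ih1, ih2, ih3, ih4⟩ :=
        ih (PySem.Int.floordiv N d) d (by omega) (by rw [hfd]; exact hq0) h2
      rw [if_pos hguard]
      dsimp only
      exact ⟨ih1, le_trans ih2 hqle, ih3.trans hqdvd, ih4⟩
    · rw [if_neg hguard]
      refine ⟨h1, le_refl _, dvd_refl _, ?_⟩
      intro hdvd
      exact hguard ⟨h1, h2, (PySem.Int.mod_eq_zero_iff_dvd N d).mpr hdvd⟩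

theorem pfStrip_spec (N d : Int) (h1 : 0 < N) (h2 : 2 ≤ d) :
    0 < (pfStrip N d).2 ∧ (pfStrip N d).2 ≤ N ∧ (pfStrip N d).2 ∣ N ∧
      ¬ d ∣ (pfStrip N d).2 :=
  pfStrip_spec_aux N.natAbs N d (le_refl _) h1 h2

-- pfStrip's factor list is d repeated
theorem pfStrip_fst_aux : ∀ (f : Nat) (N d : Int), N.natAbs ≤ f →
    (pfStrip N d).1 = List.replicate (pfStrip N d).1.length d := by
  intro f
  induction f with
  | zero =>
    intro N d hf
    have hN : N = 0 := by omega
    rw [pfStrip_eq, if_neg (by omega)]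
    simp
  | succ f ih =>
    intro N d hf
    rw [pfStrip_eq]
    by_cases hguard : 0 < N ∧ 2 ≤ d ∧ PySem.Int.mod N d = 0
    · have hlt := fd_natAbs_lt N d hguard.1 hguard.2.1
      rw [if_pos hguard]
      simp only [List.length_cons, List.replicate_succ, List.cons.injEq]
      exact ⟨trivial, ih (PySem.Int.floordiv N d) d (by omega)⟩
    · rw [if_neg hguard]
      simp

theorem pfStrip_fst (N d : Int) :
    (pfStrip N d).1 = List.replicate (pfStrip N d).1.length d :=
  pfStrip_fst_aux N.natAbs N d (le_refl _)

-- bStrip computes pfStrip's leftover together with the number of stripped factors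
theorem bStrip_pfStrip_aux : ∀ (f : Nat) (n d e : Int), n.natAbs ≤ f →
    (bStrip n d e).1 = (pfStrip n d).2 ∧
      (bStrip n d e).2 = e + ((pfStrip n d).1.length : Int) := by
  intro f
  induction f with
  | zero =>
    intro n d e hf
    have hN : n = 0 := by omega
    rw [bStrip_eq, if_neg (by omega), pfStrip_eq, if_neg (by omega)]
    simp
  | succ f ih =>
    intro n d e hf
    rw [bStrip_eq, pfStrip_eq]
    by_cases hguard : 0 < n ∧ 2 ≤ d ∧ PySem.Int.mod n d = 0
    · have hlt := fd_natAbs_lt n d hguard.1 hguard.2.1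
      rw [if_pos hguard, if_pos hguard]
      obtain ⟨ih1, ih2⟩ := ih (PySem.Int.floordiv n d) d (e + 1) (by omega)
      refine ⟨ih1, ?_⟩
      rw [ih2]
      simp only [List.length_cons]
      push_cast
      ring
    · rw [if_neg hguard, if_neg hguard]
      simp

theorem bStrip_pfStrip (n d e : Int) :
    (bStrip n d e).1 = (pfStrip n d).2 ∧
      (bStrip n d e).2 = e + ((pfStrip n d).1.length : Int) :=
  bStrip_pfStrip_aux n.natAbs n d e (le_refl _)

-- any fuel ≥ (N + 1 - d).toNat gives pfOuterF the same value
theorem pfOuterF_congr : ∀ (f g : Nat) (N d : Int), (N + 1 - d).toNat ≤ f → (N + 1 - d).toNat ≤ g →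
    pfOuterF f N d = pfOuterF g N d := by
  intro f
  induction f with
  | zero =>
    intro g N d hf _
    have hguard : ¬ (2 ≤ d ∧ d * d ≤ N) := by
      rintro ⟨hd, hdd⟩
      have : d ≤ d * d := by nlinarith
      omega
    cases g with
    | zero => rfl
    | succ g => simp only [pfOuterF]; rw [if_neg hguard]
  | succ f ih =>
    intro g N d hf hg
    cases g with
    | zero =>
      have hguard : ¬ (2 ≤ d ∧ d * d ≤ N) := by
        rintro ⟨hd, hdd⟩
        have : d ≤ d * d := by nlinarith
        omega
      simp only [pfOuterF]; rw [if_neg hguard]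
    | succ g =>
      simp only [pfOuterF]
      by_cases hguard : 2 ≤ d ∧ d * d ≤ N
      · rw [if_pos hguard, if_pos hguard]
        have hN : 0 < N := by nlinarith [hguard.1, hguard.2]
        have hspec := pfStrip_spec N d hN hguard.1
        have hdN : d ≤ N := by nlinarith [hguard.1, hguard.2]
        rw [ih g (pfStrip N d).2 (d + 1) (by omega) (by omega)]
      · rw [if_neg hguard, if_neg hguard]

theorem pfOuter_eq (N d : Int) : pfOuter N d =
    if 2 ≤ d ∧ d * d ≤ N then (pfStrip N d).1 ++ pfOuter (pfStrip N d).2 (d + 1)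
    else if 1 < N then [N] else [] := by
  show pfOuterF (N + 1 - d).toNat N d = _
  by_cases hguard : 2 ≤ d ∧ d * d ≤ N
  · have hN : 0 < N := by nlinarith [hguard.1, hguard.2]
    have hspec := pfStrip_spec N d hN hguard.1
    have hdN : d ≤ N := by nlinarith [hguard.1, hguard.2]
    rcases hfn : (N + 1 - d).toNat with _ | m
    · omega
    · simp only [pfOuterF]
      rw [if_pos hguard, if_pos hguard,
        pfOuterF_congr m ((pfStrip N d).2 + 1 - (d + 1)).toNat (pfStrip N d).2 (d + 1)
          (by omega) (le_refl _)]
      rfl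
  · rcases hfn : (N + 1 - d).toNat with _ | m
    · simp only [pfOuterF]
      rw [if_neg hguard]
    · simp only [pfOuterF]
      rw [if_neg hguard, if_neg hguard]

theorem bLoopF_congr : ∀ (f g : Nat) (n d : Int) (best : PySem.Dict Int Int),
    (n + 1 - d).toNat ≤ f → (n + 1 - d).toNat ≤ g →
    bLoopF f n d best = bLoopF g n d best := by
  intro f
  induction f with
  | zero =>
    intro g n d best hf _
    have hguard : ¬ (2 ≤ d ∧ d * d ≤ n) := by
      rintro ⟨hd, hdd⟩
      have : d ≤ d * d := by nlinarith
      omega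
    cases g with
    | zero => rfl
    | succ g => simp only [bLoopF]; rw [if_neg hguard]
  | succ f ih =>
    intro g n d best hf hg
    cases g with
    | zero =>
      have hguard : ¬ (2 ≤ d ∧ d * d ≤ n) := by
        rintro ⟨hd, hdd⟩
        have : d ≤ d * d := by nlinarith
        omega
      simp only [bLoopF]; rw [if_neg hguard]
    | succ g =>
      simp only [bLoopF]
      by_cases hguard : 2 ≤ d ∧ d * d ≤ n
      · rw [if_pos hguard, if_pos hguard]
        have hN : 0 < n := by nlinarith [hguard.1, hguard.2]
        have hdN : d ≤ n := by nlinarith [hguard.1, hguard.2]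
        by_cases hm : PySem.Int.mod n d = 0
        · rw [if_pos hm, if_pos hm]
          have hb := (bStrip_pfStrip n d 0).1
          have hspec := pfStrip_spec n d hN hguard.1
          exact ih g (bStrip n d 0).1 (d + 1) _ (by omega) (by omega)
        · rw [if_neg hm, if_neg hm]
          exact ih g n (d + 1) best (by omega) (by omega)
      · rw [if_neg hguard, if_neg hguard]

theorem bLoop_eq (n d : Int) (best : PySem.Dict Int Int) : bLoop n d best =
    if 2 ≤ d ∧ d * d ≤ n then
      (if PySem.Int.mod n d = 0 then
        bLoop (bStrip n d 0).1 (d + 1)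
          (if best.getD d 0 < (bStrip n d 0).2 then best.insert d (bStrip n d 0).2 else best)
      else bLoop n (d + 1) best)
    else if 1 < n then (if best.getD n 0 < 1 then best.insert n 1 else best) else best := by
  show bLoopF (n + 1 - d).toNat n d best = _
  by_cases hguard : 2 ≤ d ∧ d * d ≤ n
  · have hN : 0 < n := by nlinarith [hguard.1, hguard.2]
    have hdN : d ≤ n := by nlinarith [hguard.1, hguard.2]
    rcases hfn : (n + 1 - d).toNat with _ | m
    · omega
    · simp only [bLoopF]
      rw [if_pos hguard, if_pos hguard]
      by_cases hm : PySem.Int.mod n d = 0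
      · rw [if_pos hm, if_pos hm]
        have hb := (bStrip_pfStrip n d 0).1
        have hspec := pfStrip_spec n d hN hguard.1
        exact bLoopF_congr m ((bStrip n d 0).1 + 1 - (d + 1)).toNat (bStrip n d 0).1 (d + 1) _
          (by omega) (le_refl _)
      · rw [if_neg hm, if_neg hm]
        exact bLoopF_congr m (n + 1 - (d + 1)).toNat n (d + 1) best (by omega) (le_refl _)
  · rcases hfn : (n + 1 - d).toNat with _ | m
    · simp only [bLoopF]
      rw [if_neg hguard]
    · simp only [bLoopF]
      rw [if_neg hguard, if_neg hguard]

-- every element of pfOuter n d is ≥ d, given nothing below d divides n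
theorem pfOuter_ge_aux : ∀ (f : Nat) (n d : Int), (n + 1 - d).toNat ≤ f → 0 < n → 2 ≤ d →
    (∀ k, 2 ≤ k → k < d → ¬ k ∣ n) → ∀ x ∈ pfOuter n d, d ≤ x := by
  intro f
  induction f with
  | zero =>
    intro n d hf h1 h2 hinv x hx
    have hguard : ¬ (2 ≤ d ∧ d * d ≤ n) := by
      rintro ⟨hd, hdd⟩
      have : d ≤ d * d := by nlinarith
      omega
    rw [pfOuter_eq, if_neg hguard] at hx
    split at hx
    · rcases List.mem_singleton.mp hx with rfl
      by_contra hnd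
      exact hinv x (by omega) (by omega) dvd_rfl
    · simp at hx
  | succ f ih =>
    intro n d hf h1 h2 hinv x hx
    rw [pfOuter_eq] at hx
    by_cases hguard : 2 ≤ d ∧ d * d ≤ n
    · rw [if_pos hguard] at hx
      have hspec := pfStrip_spec n d h1 h2
      have hdN : d ≤ n := by nlinarith [hguard.1, hguard.2]
      have hinv2 : ∀ k, 2 ≤ k → k < d + 1 → ¬ k ∣ (pfStrip n d).2 := by
        intro k hk2 hkd hkdvd
        rcases eq_or_ne k d with rfl | hne
        · exact hspec.2.2.2 hkdvd
        · exact hinv k hk2 (by omega) (hkdvd.trans hspec.2.2.1)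
      rcases List.mem_append.mp hx with hxl | hxr
      · rw [pfStrip_fst] at hxl
        rw [List.eq_of_mem_replicate hxl]
      · have := ih (pfStrip n d).2 (d + 1) (by omega) hspec.1 (by omega) hinv2 x hxr
        omega
    · rw [if_neg hguard] at hx
      split at hx
      · rcases List.mem_singleton.mp hx with rfl
        by_contra hnd
        exact hinv x (by omega) (by omega) dvd_rfl
      · simp at hx

theorem pfOuter_ge (n d : Int) (h1 : 0 < n) (h2 : 2 ≤ d)
    (hinv : ∀ k, 2 ≤ k → k < d → ¬ k ∣ n) : ∀ x ∈ pfOuter n d, d ≤ x :=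
  pfOuter_ge_aux (n + 1 - d).toNat n d (le_refl _) h1 h2 hinv

-- one step of A's inner for-loop bumps the count of j to max(set count, current count)
theorem count_mergeOne (cpl S : List Int) (j : Int) (hj : j ∈ cpl) (x : Int) :
    List.count x (mergeOne cpl S j) =
      if x = j then max (List.count x S) (List.count x cpl) else List.count x S := by
  have hc1 : 1 ≤ List.count j cpl := List.count_pos_iff.mpr hj
  have hfold : ∀ (acc : List Int) (l : List Int),
      l.foldl (fun acc _ => acc ++ [j]) acc = acc ++ l.map (fun _ => j) :=
    fun acc l => PySem.List.foldl_append_singleton_eq_map (fun _ => j) l acc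
  simp only [mergeOne, PySem.List.count_eq]
  by_cases hm : j ∈ S
  case pos =>
    have hjc : 1 ≤ List.count j S := List.count_pos_iff.mpr hm
    rw [if_pos hm, if_pos hm]
    by_cases hlt : (List.count j S : Int) < (List.count j cpl : Int)
    · rw [if_pos hlt, hfold]
      rcases eq_or_ne x j with rfl | hx
      · rw [if_pos rfl]
        simp [List.count_append]
        omega
      · rw [if_neg hx]
        simp [List.count_append, List.count_replicate, Ne.symm hx]
    · rw [if_neg hlt]
      rcases eq_or_ne x j with rfl | hx
      · rw [if_pos rfl]; omega
      · rw [if_neg hx]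
  case neg =>
    have hjz : List.count j S = 0 := List.count_eq_zero_of_not_mem hm
    have hm2 : j ∈ S ++ [j] := by simp
    rw [if_neg hm, if_pos hm2]
    by_cases hlt : (List.count j (S ++ [j]) : Int) < (List.count j cpl : Int)
    · rw [if_pos hlt, hfold]
      rcases eq_or_ne x j with rfl | hx
      · rw [if_pos rfl]
        simp [List.count_append, hjz]
        omega
      · rw [if_neg hx]
        simp [List.count_append, List.count_replicate, Ne.symm hx]
    · rw [if_neg hlt]
      have hco : List.count j (S ++ [j]) = 1 := by simp [List.count_append, hjz]
      rw [hco] at hlt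
      rcases eq_or_ne x j with rfl | hx
      · rw [if_pos rfl]
        simp [List.count_append, hjz]
        omega
      · rw [if_neg hx]
        simp [List.count_append, Ne.symm hx]

-- the whole inner for-loop: the set's counts become pointwise maxima
theorem count_fold_merge (cpl S : List Int) (x : Int) :
    List.count x (cpl.foldl (mergeOne cpl) S) =
      max (List.count x S) (List.count x cpl) := by
  have aux : ∀ (l S : List Int), (∀ j ∈ l, j ∈ cpl) → ∀ x,
      List.count x (l.foldl (mergeOne cpl) S) =
        if x ∈ l then max (List.count x S) (List.count x cpl) else List.count x S := by
    intro l
    induction l with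
    | nil => intro S _ x; simp
    | cons j t iht =>
      intro S hmem x
      simp only [List.foldl_cons]
      rw [iht (mergeOne cpl S j) (fun a ha => hmem a (by simp [ha])) x,
        count_mergeOne cpl S j (hmem j (by simp)) x]
      rcases eq_or_ne x j with rfl | hx
      · by_cases hxt : x ∈ t
        · simp [hxt]
        · simp [hxt]
      · by_cases hxt : x ∈ t
        · simp [hxt, hx]
        · simp [hxt, hx]
  rw [aux cpl S (fun j hj => hj) x]
  by_cases hx : x ∈ cpl
  · rw [if_pos hx]
  · rw [if_neg hx, List.count_eq_zero_of_not_mem hx]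
    omega


-- the trailing 'if n > 1:' update, shared by the fuel-0 and guard-false branches
theorem bLoop_getD_leaf (n d : Int) (D : PySem.Dict Int Int) (h1 : 0 < n)
    (hguard : ¬ (2 ≤ d ∧ d * d ≤ n)) (hnn : ∀ x, 0 ≤ D.getD x 0) (x : Int) :
    (bLoop n d D).getD x 0 = max (D.getD x 0) ((List.count x (pfOuter n d) : Int)) := by
  rw [bLoop_eq, if_neg hguard, pfOuter_eq, if_neg hguard]
  have hDx := hnn x
  by_cases hn : 1 < n
  · rw [if_pos hn, if_pos hn]
    by_cases hlt : D.getD n 0 < 1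
    · rw [if_pos hlt, PySem.Dict.getD_insert]
      rcases eq_or_ne x n with rfl | hx
      · have hcs : List.count x [x] = 1 := by rw [List.count_cons_self, List.count_nil]
        rw [if_pos rfl, hcs]
        push_cast
        omega
      · have hcs : List.count x [n] = 0 := by
          rw [List.count_cons_of_ne (Ne.symm hx), List.count_nil]
        rw [if_neg hx, hcs]
        push_cast
        omega
    · rw [if_neg hlt]
      rcases eq_or_ne x n with rfl | hx
      · have hcs : List.count x [x] = 1 := by rw [List.count_cons_self, List.count_nil]
        rw [hcs]
        push_cast
        omega
      · have hcs : List.count x [n] = 0 := by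
          rw [List.count_cons_of_ne (Ne.symm hx), List.count_nil]
        rw [hcs]
        push_cast
        omega
  · rw [if_neg hn, if_neg hn]
    have hcs : List.count x ([] : List Int) = 0 := List.count_nil
    rw [hcs]
    push_cast
    omega

-- B's bLoop records, for each prime, the max of the stored exponent and n's exponent
theorem bLoop_getD_aux : ∀ (f : Nat) (n d : Int) (D : PySem.Dict Int Int),
    (n + 1 - d).toNat ≤ f → 0 < n → 2 ≤ d →
    (∀ k, 2 ≤ k → k < d → ¬ k ∣ n) → (∀ x, 0 ≤ D.getD x 0) → ∀ x,
    (bLoop n d D).getD x 0 = max (D.getD x 0) ((List.count x (pfOuter n d) : Int)) := by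
  intro f
  induction f with
  | zero =>
    intro n d D hf h1 h2 hinv hnn x
    have hguard : ¬ (2 ≤ d ∧ d * d ≤ n) := by
      rintro ⟨hd, hdd⟩
      have : d ≤ d * d := by nlinarith
      omega
    exact bLoop_getD_leaf n d D h1 hguard hnn x
  | succ f ih =>
    intro n d D hf h1 h2 hinv hnn x
    by_cases hguard : 2 ≤ d ∧ d * d ≤ n
    · have hdN : d ≤ n := by nlinarith [hguard.1, hguard.2]
      have hspec := pfStrip_spec n d h1 h2
      by_cases hm : PySem.Int.mod n d = 0
      · have hbs := bStrip_pfStrip n d 0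
        have hble : (bStrip n d 0).1 ≤ n := by rw [hbs.1]; exact hspec.2.1
        have hbpos : 0 < (bStrip n d 0).1 := by rw [hbs.1]; exact hspec.1
        have hbl : bLoop n d D = bLoop (bStrip n d 0).1 (d + 1)
            (if D.getD d 0 < (bStrip n d 0).2 then D.insert d (bStrip n d 0).2 else D) := by
          rw [bLoop_eq, if_pos hguard, if_pos hm]
        have hout : pfOuter n d = (pfStrip n d).1 ++ pfOuter (pfStrip n d).2 (d + 1) := by
          rw [pfOuter_eq, if_pos hguard]
        have hE : (bStrip n d 0).2 = ((pfStrip n d).1.length : Int) := by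
          rw [hbs.2]; ring
        have hlen : 1 ≤ (pfStrip n d).1.length := by
          have hcons : pfStrip n d =
              (d :: (pfStrip (PySem.Int.floordiv n d) d).1,
                (pfStrip (PySem.Int.floordiv n d) d).2) := by
            rw [pfStrip_eq, if_pos ⟨h1, h2, hm⟩]
          rw [hcons]
          simp
        have hinv2 : ∀ k, 2 ≤ k → k < d + 1 → ¬ k ∣ (pfStrip n d).2 := by
          intro k hk2 hkd hkdvd
          rcases eq_or_ne k d with rfl | hne
          · exact hspec.2.2.2 hkdvd
          · exact hinv k hk2 (by omega) (hkdvd.trans hspec.2.2.1)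
        have hge := pfOuter_ge (pfStrip n d).2 (d + 1) hspec.1 (by omega) hinv2
        have hcd : List.count d (pfOuter (pfStrip n d).2 (d + 1)) = 0 :=
          List.count_eq_zero_of_not_mem (fun hmem => by have := hge d hmem; omega)
        have hcnt1 : ∀ y, List.count y (pfStrip n d).1 =
            if y = d then (pfStrip n d).1.length else 0 := by
          intro y
          rw [pfStrip_fst]
          simp only [List.length_replicate, List.count_replicate]
          rcases eq_or_ne y d with rfl | hy
          · simp
          · simp [hy, Ne.symm hy]
        have hb2 : ∀ y, (if D.getD d 0 < (bStrip n d 0).2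
              then D.insert d (bStrip n d 0).2 else D).getD y 0 =
            if y = d then max (D.getD d 0) ((bStrip n d 0).2) else D.getD y 0 := by
          intro y
          rcases eq_or_ne y d with rfl | hy
          · rw [if_pos rfl]
            split_ifs with hless
            · rw [PySem.Dict.getD_insert, if_pos rfl]
              exact (max_eq_right (le_of_lt hless)).symm
            · exact (max_eq_left (by omega)).symm
          · rw [if_neg hy]
            split_ifs with hless
            · rw [PySem.Dict.getD_insert, if_neg hy]
            · rfl
        have hnn2 : ∀ y, 0 ≤ (if D.getD d 0 < (bStrip n d 0).2
              then D.insert d (bStrip n d 0).2 else D).getD y 0 := by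
          intro y
          rw [hb2 y]
          split_ifs with hy
          · have := hnn d
            omega
          · exact hnn y
        have key := ih (bStrip n d 0).1 (d + 1)
          (if D.getD d 0 < (bStrip n d 0).2 then D.insert d (bStrip n d 0).2 else D)
          (by omega) hbpos (by omega) (by rw [hbs.1]; exact hinv2) hnn2 x
        rw [hbl, key, hb2, hout, hbs.1]
        rw [List.count_append, hcnt1 x]
        rcases eq_or_ne x d with rfl | hx
        · rw [if_pos rfl, if_pos rfl, hcd, hE]
          have := hnn x
          push_cast
          omega
        · rw [if_neg hx, if_neg hx]
          push_cast
          omega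
      · have hps : pfStrip n d = ([], n) := by
          rw [pfStrip_eq]
          simp [hm]
        have hout : pfOuter n d = pfOuter n (d + 1) := by
          rw [pfOuter_eq, if_pos hguard, hps]
          simp
        have hbl : bLoop n d D = bLoop n (d + 1) D := by
          rw [bLoop_eq, if_pos hguard, if_neg hm]
        have hinv2 : ∀ k, 2 ≤ k → k < d + 1 → ¬ k ∣ n := by
          intro k hk2 hkd hkdvd
          rcases eq_or_ne k d with rfl | hne
          · exact hm ((PySem.Int.mod_eq_zero_iff_dvd n k).mpr hkdvd)
          · exact hinv k hk2 (by omega) hkdvd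
        rw [hbl, hout]
        exact ih n (d + 1) D (by omega) h1 (by omega) hinv2 hnn x
    · exact bLoop_getD_leaf n d D h1 hguard hnn x

theorem bLoop_getD (n d : Int) (D : PySem.Dict Int Int) (h1 : 0 < n) (h2 : 2 ≤ d)
    (hinv : ∀ k, 2 ≤ k → k < d → ¬ k ∣ n) (hnn : ∀ x, 0 ≤ D.getD x 0) (x : Int) :
    (bLoop n d D).getD x 0 = max (D.getD x 0) ((List.count x (pfOuter n d) : Int)) :=
  bLoop_getD_aux (n + 1 - d).toNat n d D (le_refl _) h1 h2 hinv hnn x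

theorem bLoop_nodup_leaf (n d : Int) (D : PySem.Dict Int Int)
    (hguard : ¬ (2 ≤ d ∧ d * d ≤ n)) (hnd : D.keys.Nodup) : (bLoop n d D).keys.Nodup := by
  rw [bLoop_eq, if_neg hguard]
  split_ifs with hn hlt
  · exact PySem.Dict.nodup_keys_insert D n 1 hnd
  · exact hnd
  · exact hnd

theorem bLoop_nodup_aux : ∀ (f : Nat) (n d : Int) (D : PySem.Dict Int Int),
    (n + 1 - d).toNat ≤ f → D.keys.Nodup → (bLoop n d D).keys.Nodup := by
  intro f
  induction f with
  | zero =>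
    intro n d D hf hnd
    have hguard : ¬ (2 ≤ d ∧ d * d ≤ n) := by
      rintro ⟨hd, hdd⟩
      have : d ≤ d * d := by nlinarith
      omega
    exact bLoop_nodup_leaf n d D hguard hnd
  | succ f ih =>
    intro n d D hf hnd
    by_cases hguard : 2 ≤ d ∧ d * d ≤ n
    · have hN : 0 < n := by nlinarith [hguard.1, hguard.2]
      have hdN : d ≤ n := by nlinarith [hguard.1, hguard.2]
      by_cases hm : PySem.Int.mod n d = 0
      · have hbs := bStrip_pfStrip n d 0
        have hspec := pfStrip_spec n d hN hguard.1
        have hble : (bStrip n d 0).1 ≤ n := by rw [hbs.1]; exact hspec.2.1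
        rw [bLoop_eq, if_pos hguard, if_pos hm]
        refine ih (bStrip n d 0).1 (d + 1) _ (by omega) ?_
        split_ifs with hcv
        · exact PySem.Dict.nodup_keys_insert D d _ hnd
        · exact hnd
      · rw [bLoop_eq, if_pos hguard, if_neg hm]
        exact ih n (d + 1) D (by omega) hnd
    · exact bLoop_nodup_leaf n d D hguard hnd

theorem bLoop_nodup (n d : Int) (D : PySem.Dict Int Int) (h : D.keys.Nodup) :
    (bLoop n d D).keys.Nodup :=
  bLoop_nodup_aux (n + 1 - d).toNat n d D (le_refl _) h

theorem bLoop_nonneg_leaf (n d : Int) (D : PySem.Dict Int Int)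
    (hguard : ¬ (2 ≤ d ∧ d * d ≤ n)) (hnn : ∀ x, 0 ≤ D.getD x 0) :
    ∀ x, 0 ≤ (bLoop n d D).getD x 0 := by
  intro y
  rw [bLoop_eq, if_neg hguard]
  split_ifs with hn hlt
  · rw [PySem.Dict.getD_insert]
    split_ifs with hy
    · omega
    · exact hnn y
  · exact hnn y
  · exact hnn y

theorem bLoop_nonneg_aux : ∀ (f : Nat) (n d : Int) (D : PySem.Dict Int Int),
    (n + 1 - d).toNat ≤ f → (∀ x, 0 ≤ D.getD x 0) → ∀ x, 0 ≤ (bLoop n d D).getD x 0 := by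
  intro f
  induction f with
  | zero =>
    intro n d D hf hnn
    have hguard : ¬ (2 ≤ d ∧ d * d ≤ n) := by
      rintro ⟨hd, hdd⟩
      have : d ≤ d * d := by nlinarith
      omega
    exact bLoop_nonneg_leaf n d D hguard hnn
  | succ f ih =>
    intro n d D hf hnn
    by_cases hguard : 2 ≤ d ∧ d * d ≤ n
    · have hN : 0 < n := by nlinarith [hguard.1, hguard.2]
      have hdN : d ≤ n := by nlinarith [hguard.1, hguard.2]
      by_cases hm : PySem.Int.mod n d = 0
      · have hbs := bStrip_pfStrip n d 0
        have hspec := pfStrip_spec n d hN hguard.1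
        have hble : (bStrip n d 0).1 ≤ n := by rw [hbs.1]; exact hspec.2.1
        have hE : 0 ≤ (bStrip n d 0).2 := by
          rw [hbs.2]
          positivity
        rw [bLoop_eq, if_pos hguard, if_pos hm]
        refine ih (bStrip n d 0).1 (d + 1) _ (by omega) ?_
        intro y
        split_ifs with hcv
        · rw [PySem.Dict.getD_insert]
          split_ifs with hy
          · exact hE
          · exact hnn y
        · exact hnn y
      · rw [bLoop_eq, if_pos hguard, if_neg hm]
        exact ih n (d + 1) D (by omega) hnn
    · exact bLoop_nonneg_leaf n d D hguard hnn

theorem bLoop_nonneg (n d : Int) (D : PySem.Dict Int Int) (h : ∀ x, 0 ≤ D.getD x 0) :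
    ∀ x, 0 ≤ (bLoop n d D).getD x 0 :=
  bLoop_nonneg_aux (n + 1 - d).toNat n d D (le_refl _) h

-- the two outer folds stay in lockstep: list counts = dict values
theorem outer_fold (l : List Int) (hl : ∀ i ∈ l, 2 ≤ i) (S : List Int)
    (D : PySem.Dict Int Int) (hc : ∀ x, (List.count x S : Int) = D.getD x 0)
    (hnn : ∀ x, 0 ≤ D.getD x 0) (hnd : D.keys.Nodup) :
    (∀ x, (List.count x (l.foldl (fun S i => (primeFactorize i).foldl (mergeOne (primeFactorize i)) S) S) : Int) =
        (l.foldl (fun D i => bLoop i 2 D) D).getD x 0) ∧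
      (∀ x, 0 ≤ (l.foldl (fun D i => bLoop i 2 D) D).getD x 0) ∧
      (l.foldl (fun D i => bLoop i 2 D) D).keys.Nodup := by
  induction l generalizing S D with
  | nil => exact ⟨hc, hnn, hnd⟩
  | cons i t iht =>
    have hi : 2 ≤ i := hl i (by simp)
    simp only [List.foldl_cons]
    refine iht (fun a ha => hl a (by simp [ha])) _ _ ?_
      (bLoop_nonneg i 2 D hnn) (bLoop_nodup i 2 D hnd)
    intro x
    rw [count_fold_merge (primeFactorize i) S x,
      bLoop_getD i 2 D (by omega) (by omega) (fun k hk1 hk2 => absurd hk2 (by omega)) hnn x,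
      ← hc x]
    show ((max (List.count x S) (List.count x (pfOuter i 2)) : Nat) : Int) = _
    push_cast
    rfl

theorem count_flatMap_replicate (K : List Int) (f : Int → Nat) (hK : K.Nodup) (x : Int) :
    List.count x (K.flatMap (fun p => List.replicate (f p) p)) =
      if x ∈ K then f x else 0 := by
  revert hK
  induction K with
  | nil => intro _; simp
  | cons p K ih =>
    intro hK
    rcases List.nodup_cons.mp hK with ⟨hp, hK2⟩
    simp only [List.flatMap_cons, List.count_append, ih hK2]
    rcases eq_or_ne x p with rfl | hx
    · simp [hp]
    · simp [List.count_replicate, hx, Ne.symm hx]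

theorem pairwise_flatMap_replicate (K : List Int) (f : Int → Nat)
    (hK : K.Pairwise (· < ·)) :
    (K.flatMap (fun p => List.replicate (f p) p)).Pairwise (· ≤ ·) := by
  revert hK
  induction K with
  | nil => intro _; simp
  | cons p K ih =>
    intro hK
    rcases List.pairwise_cons.mp hK with ⟨hp, hK2⟩
    simp only [List.flatMap_cons]
    rw [List.pairwise_append]
    refine ⟨List.pairwise_replicate.mpr (Or.inr (le_refl p)), ih hK2, ?_⟩
    intro a ha b hb
    rcases List.eq_of_mem_replicate ha with rfl
    rcases List.mem_flatMap.mp hb with ⟨q, hq, hbq⟩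
    rcases List.eq_of_mem_replicate hbq with rfl
    exact le_of_lt (hp _ hq)

-- final assembly: sorting A's multiset equals emitting B's sorted keys with multiplicities
theorem final_eq (S : List Int) (D : PySem.Dict Int Int)
    (hc : ∀ x, (List.count x S : Int) = D.getD x 0) (hnd : D.keys.Nodup) :
    PySem.List.sorted S (fun x => x) false =
      (PySem.List.sorted (PySem.Dict.keys D) (fun x => x) false).foldl
        (fun out p => out ++ PySem.List.pyRepeat [p] (D.getD p 0)) [] := by
  have hKnd : (PySem.List.sorted (PySem.Dict.keys D) (fun x => x) false).Nodup :=
    (PySem.List.sorted_perm (PySem.Dict.keys D) (fun x => x) false).nodup_iff.mpr hnd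
  have hKle : (PySem.List.sorted (PySem.Dict.keys D) (fun x => x) false).Pairwise (· ≤ ·) := by
    have := PySem.List.sorted_pairwise (PySem.Dict.keys D) (fun x => x)
    simpa using this
  have hKlt : (PySem.List.sorted (PySem.Dict.keys D) (fun x => x) false).Pairwise (· < ·) :=
    (hKle.and hKnd).imp (fun hab => lt_of_le_of_ne hab.1 hab.2)
  have hfold : (PySem.List.sorted (PySem.Dict.keys D) (fun x => x) false).foldl
        (fun out p => out ++ PySem.List.pyRepeat [p] (D.getD p 0)) [] =
      (PySem.List.sorted (PySem.Dict.keys D) (fun x => x) false).flatMap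
        (fun p => List.replicate (D.getD p 0).toNat p) := by
    rw [PySem.List.foldl_append_eq_flatMap]
    simp [PySem.List.pyRepeat_singleton]
  have hcnt : ∀ x, List.count x ((PySem.List.sorted (PySem.Dict.keys D) (fun x => x) false).flatMap
      (fun p => List.replicate (D.getD p 0).toNat p)) = List.count x S := by
    intro x
    rw [count_flatMap_replicate _ _ hKnd x]
    by_cases hxk : x ∈ PySem.List.sorted (PySem.Dict.keys D) (fun x => x) false
    · rw [if_pos hxk]
      have := hc x
      omega
    · rw [if_neg hxk]
      have hxkeys : x ∉ PySem.Dict.keys D := fun hxx =>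
        hxk ((PySem.List.mem_sorted (PySem.Dict.keys D) (fun x => x) false x).mpr hxx)
      have hcf : PySem.Dict.contains D x = false := by
        cases hcb : PySem.Dict.contains D x with
        | false => rfl
        | true => exact absurd ((PySem.Dict.contains_iff_mem_keys D x).mp hcb) hxkeys
      have h0 : D.getD x 0 = 0 := PySem.Dict.getD_of_not_contains D 0 hcf
      have := hc x
      omega
  have hperm : ((PySem.List.sorted (PySem.Dict.keys D) (fun x => x) false).flatMap
      (fun p => List.replicate (D.getD p 0).toNat p)).Perm S :=
    List.perm_iff_count.mpr (fun a => hcnt a)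
  have hpw := pairwise_flatMap_replicate _ (fun p => (D.getD p 0).toNat) hKlt
  rw [hfold]
  exact PySem.List.sorted_id_eq_of_perm_of_pairwise S _ hperm hpw

-- ===== VERDICT (by name: the statement is the Claim_ definition above) =====
theorem LCMprimeList_spec : Claim_equal_LCMprimeList := by
  intro num _
  unfold Spec_LCMprimeList LCMprimeList LCMprimeList_alt
  have h := outer_fold (PySem.List.pyRange 2 (num + 1) 1)
    (by intro i hi; rw [PySem.List.mem_pyRange_one] at hi; omega) []
    PySem.Dict.empty (by intro x; simp [PySem.Dict.getD_empty])
    (by intro x; simp [PySem.Dict.getD_empty]) (by simp [PySem.Dict.keys_empty])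
  exact final_eq _ _ h.1 h.2.2
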